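-- pv_equiv track=rewrite | github.com/ddururiiiiiii/codingTest_python | .idea/codingTestStudy231004/day07.py | solution
-- ===== SOURCE A (Python) =====
-- def solution(arr):
--     stk = []
--     i = 0;
--
--     while i < len(arr) :
--         if stk == [] :
--             stk.append(arr[i])
--             i += 1
--         elif stk[-1] < arr[i] :
--             stk.append(arr[i])
--             i += 1
--         elif stk[-1] >= arr[i]:
--             del stk[-1]
--
--     return stk
-- ===== SOURCE B (Python) =====
-- def solution(arr):
--     res = []
--     for x in reversed(arr):
--         if not res or x < res[-1]:
--             res.append(x)
--     res.reverse()
--     return res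
-- ===== Notes on version B (the rewrite author's own statement) =====
-- stated objective: simpler
-- what changed: Replaces the while-loop with pop-on-not-greater stack maintenance by a single right-to-left pass that keeps an element exactly when it is below the running minimum of the elements to its right.
import Mathlib
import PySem

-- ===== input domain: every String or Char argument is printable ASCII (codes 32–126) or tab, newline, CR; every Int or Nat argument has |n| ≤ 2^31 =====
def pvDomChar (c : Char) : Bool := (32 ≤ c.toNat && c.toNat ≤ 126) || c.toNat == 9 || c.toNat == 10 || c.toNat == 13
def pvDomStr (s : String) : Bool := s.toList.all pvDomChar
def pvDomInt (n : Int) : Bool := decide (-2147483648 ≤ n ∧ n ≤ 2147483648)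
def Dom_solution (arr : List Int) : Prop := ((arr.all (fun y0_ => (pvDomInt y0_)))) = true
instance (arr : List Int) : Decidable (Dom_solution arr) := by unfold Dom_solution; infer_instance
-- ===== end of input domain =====

-- B replaces A's while-loop stack maintenance by one right-to-left running-minimum pass (objective: simpler).

-- ===== PORT A =====
-- The Python while-loop, as well-founded recursion on the measure 2*(len arr - i) + len stk.
-- The stack is kept TOP-FIRST (Python's stk.append/stk[-1]/del stk[-1] act on the head here),
-- so the bottom-to-top Python list is recovered by a final .reverse in `solution`.
def solutionLoop (arr : List Int) (i : Nat) (stk : List Int) : List Int :=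
  if h : i < arr.length then
    match stk with
    | [] => solutionLoop arr (i + 1) [arr[i]]
    | t :: rest =>
      if t < arr[i] then solutionLoop arr (i + 1) (arr[i] :: t :: rest)
      else solutionLoop arr i rest
  else stk
termination_by 2 * (arr.length - i) + stk.length
decreasing_by all_goals simp only [List.length_cons, List.length_nil]; omega

def solution (arr : List Int) : List Int := (solutionLoop arr 0 []).reverse

-- ===== PORT B =====
-- Source B builds `res` by appending (here: cons, so the Lean list is Python's res reversed);
-- since Source B ends with res.reverse(), the folded list is returned as-is.
def solution_alt (arr : List Int) : List Int :=
  arr.reverse.foldl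
    (fun res x =>
      match res with
      | [] => [x]
      | y :: _ => if x < y then x :: res else res) []

-- ===== PRECONDITION & SPEC =====
def Spec_solution (arr : List Int) (out : List Int) : Prop := out = solution_alt arr
instance (arr : List Int) (out : List Int) : Decidable (Spec_solution arr out) := by unfold Spec_solution; infer_instance

-- ===== CLAIM (what is proved, stated in full; the proofs are below) =====
def Claim_equal_solution : Prop := ∀ (arr : List Int), Dom_solution arr → Spec_solution arr (solution arr)

-- ===== LEMMAS AND PROOFS =====

-- A's loop body as a fold step (pop while top ≥ x, then push x).
def stepA (stk : List Int) (x : Int) : List Int := x :: stk.dropWhile (fun t => decide (x ≤ t))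

-- B as a structural right fold.
def gB : List Int → List Int
  | [] => []
  | x :: xs =>
    match gB xs with
    | [] => [x]
    | y :: t => if x < y then x :: y :: t else y :: t

def minL : Int → List Int → Int
  | a, [] => a
  | a, b :: l => min a (minL b l)

theorem solution_alt_eq_gB (arr : List Int) : solution_alt arr = gB arr := by
  unfold solution_alt
  rw [List.foldl_reverse]
  induction arr with
  | nil => rfl
  | cons x xs ih =>
    simp only [List.foldr_cons, ih, gB]
    cases gB xs <;> rfl

theorem gB_head : ∀ (xs : List Int) (x : Int), ∃ t, gB (x :: xs) = minL x xs :: t := by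
  intro xs
  induction xs with
  | nil => intro x; exact ⟨[], rfl⟩
  | cons y ys ih =>
    intro x
    obtain ⟨t, ht⟩ := ih y
    simp only [gB] at ht ⊢
    rw [ht]
    by_cases hx : x < minL y ys
    · refine ⟨minL y ys :: t, ?_⟩
      simp [hx, minL, min_def]
      omega
    · refine ⟨t, ?_⟩
      simp [hx, minL, min_def]
      omega

theorem dropWhile_dropWhile (p q : Int → Bool) (h : ∀ a, p a = true → q a = true) :
    ∀ s : List Int, (s.dropWhile p).dropWhile q = s.dropWhile q := by
  intro s
  induction s with
  | nil => rfl
  | cons a s ih =>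
    by_cases hp : p a = true
    · rw [List.dropWhile_cons_of_pos hp, ih, List.dropWhile_cons_of_pos (h a hp)]
    · rw [List.dropWhile_cons_of_neg (by simpa using hp)]

theorem foldA_eq : ∀ (xs : List Int) (x : Int) (stk : List Int),
    List.foldl stepA stk (x :: xs) =
      (gB (x :: xs)).reverse ++ stk.dropWhile (fun t => decide (minL x xs ≤ t)) := by
  intro xs
  induction xs with
  | nil =>
    intro x stk
    rfl
  | cons y ys ih =>
    intro x stk
    have : List.foldl stepA stk (x :: y :: ys) = List.foldl stepA (stepA stk x) (y :: ys) := rfl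
    rw [this, ih y (stepA stk x)]
    obtain ⟨t, ht⟩ := gB_head ys y
    set m := minL y ys with hm
    by_cases hx : x < m
    · have hgB : gB (x :: y :: ys) = x :: gB (y :: ys) := by
        simp only [gB] at ht ⊢
        rw [ht]; simp [hx]
      have hmin : minL x (y :: ys) = x := by simp [minL, min_def]; omega
      have hdrop : (stepA stk x).dropWhile (fun t => decide (m ≤ t)) =
          x :: stk.dropWhile (fun t => decide (x ≤ t)) := by
        unfold stepA
        rw [List.dropWhile_cons_of_neg (by simp; omega)]
      rw [hdrop, hgB, hmin]
      simp
    · have hgB : gB (x :: y :: ys) = gB (y :: ys) := by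
        simp only [gB] at ht ⊢
        rw [ht]; simp [hx]
      have hmin : minL x (y :: ys) = m := by simp [minL, min_def]; omega
      have hdrop : (stepA stk x).dropWhile (fun t => decide (m ≤ t)) =
          stk.dropWhile (fun t => decide (m ≤ t)) := by
        unfold stepA
        rw [List.dropWhile_cons_of_pos (by simp; omega)]
        exact dropWhile_dropWhile _ _ (by intro a ha; simp at ha ⊢; omega) stk
      rw [hdrop, hgB, hmin]

theorem solutionLoop_eq : ∀ (arr : List Int) (i : Nat) (stk : List Int),
    solutionLoop arr i stk = List.foldl stepA stk (arr.drop i) := by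
  intro arr i stk
  induction i, stk using solutionLoop.induct arr with
  | case1 i h ih =>
    rw [solutionLoop, dif_pos h]
    show solutionLoop arr (i + 1) [arr[i]] = _
    rw [ih, List.drop_eq_getElem_cons h, List.foldl_cons]
    rfl
  | case2 i h t rest hlt ih =>
    rw [solutionLoop, dif_pos h]
    show (if t < arr[i] then solutionLoop arr (i + 1) (arr[i] :: t :: rest)
          else solutionLoop arr i rest) = List.foldl stepA (t :: rest) (List.drop i arr)
    rw [if_pos hlt, ih, List.drop_eq_getElem_cons h, List.foldl_cons]
    congr 1
    simp only [stepA]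
    rw [List.dropWhile_cons_of_neg (by simp; omega)]
  | case3 i h t rest hlt ih =>
    rw [solutionLoop, dif_pos h]
    show (if t < arr[i] then solutionLoop arr (i + 1) (arr[i] :: t :: rest)
          else solutionLoop arr i rest) = List.foldl stepA (t :: rest) (List.drop i arr)
    rw [if_neg hlt, ih, List.drop_eq_getElem_cons h, List.foldl_cons, List.foldl_cons]
    congr 1
    simp only [stepA]
    rw [List.dropWhile_cons_of_pos (by simp; omega)]
  | case4 i stk h =>
    rw [solutionLoop, dif_neg h, List.drop_eq_nil_of_le (by omega)]
    rfl

theorem solution_eq_gB (arr : List Int) : solution arr = gB arr := by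
  unfold solution
  rw [solutionLoop_eq]
  cases arr with
  | nil => rfl
  | cons x xs =>
    rw [show (x :: xs).drop 0 = x :: xs from rfl, foldA_eq]
    simp

-- ===== VERDICT (by name: the statement is the Claim_ definition above) =====
theorem solution_spec : Claim_equal_solution := by
  intro arr _
  unfold Spec_solution
  rw [solution_eq_gB, solution_alt_eq_gB]
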